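-- pv_equiv track=rewrite | github.com/Sanketarali/coding-problems | count_alphabets_digit_special_char.py | count_alphabets_digits_special_chars
-- ===== SOURCE A (Python) =====
-- def count_alphabets_digits_special_chars(input_string):
--     alphabets = digits = special_chars = 0
--
--     for char in input_string:
--         if char.isalpha():
--             alphabets += 1
--         elif char.isdigit():
--             digits += 1
--         else:
--             special_chars += 1
--
--     return alphabets, digits, special_chars
-- ===== SOURCE B (Python) =====
-- def count_alphabets_digits_special_chars(input_string):
--     alphabets = sum(1 for c in input_string if c.isalpha())
--     digits = sum(1 for c in input_string if c.isdigit())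
--     return alphabets, digits, len(input_string) - alphabets - digits
-- ===== Notes on version B (the rewrite author's own statement) =====
-- stated objective: simpler
-- what changed: Replaces the single three-way branching accumulator loop by two independent counting passes (countP over isalpha, countP over isdigit) and derives special_chars arithmetically as len - alphabets - digits.
import Mathlib
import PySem

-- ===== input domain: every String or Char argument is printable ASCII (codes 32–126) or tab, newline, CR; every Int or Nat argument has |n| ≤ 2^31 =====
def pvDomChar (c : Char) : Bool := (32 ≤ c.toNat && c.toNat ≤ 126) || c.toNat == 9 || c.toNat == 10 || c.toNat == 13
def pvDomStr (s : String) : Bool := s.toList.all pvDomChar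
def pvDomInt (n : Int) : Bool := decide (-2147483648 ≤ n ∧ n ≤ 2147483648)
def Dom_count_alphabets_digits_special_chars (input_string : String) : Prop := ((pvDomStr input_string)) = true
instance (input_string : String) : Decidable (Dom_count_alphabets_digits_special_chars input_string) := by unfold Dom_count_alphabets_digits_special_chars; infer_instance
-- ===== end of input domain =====

-- B counts alphabets and digits in two independent passes and derives special_chars
-- as len - alphabets - digits (simpler decomposition; same O(n) cost).


-- ===== PORT A =====
-- single loop, three-way branch, three accumulators (as in Source A)
def count_alphabets_digits_special_chars (input_string : String) : Int × Int × Int :=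
  input_string.toList.foldl
    (fun acc c =>
      if PySem.Chars.isalpha c then (acc.1 + 1, acc.2.1, acc.2.2)
      else if PySem.Chars.isdigit c then (acc.1, acc.2.1 + 1, acc.2.2)
      else (acc.1, acc.2.1, acc.2.2 + 1))
    (0, 0, 0)

-- ===== PORT B =====
-- two counting passes (sum-of-generator = countP), special chars by subtraction (as in Source B)
def count_alphabets_digits_special_chars_alt (input_string : String) : Int × Int × Int :=
  let alphabets : Int := (input_string.toList.countP PySem.Chars.isalpha : Nat)
  let digits : Int := (input_string.toList.countP PySem.Chars.isdigit : Nat)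
  (alphabets, digits, (PySem.Str.len input_string : Int) - alphabets - digits)

-- ===== PRECONDITION & SPEC =====
def Spec_count_alphabets_digits_special_chars (input_string : String) (out : Int × Int × Int) : Prop := out = count_alphabets_digits_special_chars_alt input_string
instance (input_string : String) (out : Int × Int × Int) : Decidable (Spec_count_alphabets_digits_special_chars input_string out) := by unfold Spec_count_alphabets_digits_special_chars; infer_instance

-- ===== CLAIM (what is proved, stated in full; the proofs are below) =====
def Claim_equal_count_alphabets_digits_special_chars : Prop := ∀ (input_string : String), Dom_count_alphabets_digits_special_chars input_string → Spec_count_alphabets_digits_special_chars input_string (count_alphabets_digits_special_chars input_string)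

-- ===== LEMMAS AND PROOFS =====

-- a character satisfying isalpha never satisfies isdigit
theorem pv_alpha_not_digit (c : Char) (h : PySem.Chars.isalpha c = true) :
    PySem.Chars.isdigit c = false := by
  simp only [PySem.Chars.isalpha, PySem.Chars.isupper, PySem.Chars.islower,
    PySem.Chars.isdigit, Bool.or_eq_true, Bool.and_eq_true, decide_eq_true_eq] at *
  rw [Bool.and_eq_false_iff]
  simp only [decide_eq_false_iff_not] at *
  rcases h with ⟨h1, _⟩ | ⟨h1, _⟩ <;>
    exact Or.inr fun hc => absurd (le_trans h1 hc) (by decide)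

-- loop invariant for A's fold, generalized over the accumulators
theorem pv_fold_eq (l : List Char) (a d sp : Int) :
    l.foldl
      (fun acc c =>
        if PySem.Chars.isalpha c then (acc.1 + 1, acc.2.1, acc.2.2)
        else if PySem.Chars.isdigit c then (acc.1, acc.2.1 + 1, acc.2.2)
        else (acc.1, acc.2.1, acc.2.2 + 1))
      (a, d, sp)
    = (a + l.countP PySem.Chars.isalpha,
       d + l.countP PySem.Chars.isdigit,
       sp + ((l.length : Int) - l.countP PySem.Chars.isalpha - l.countP PySem.Chars.isdigit)) := by
  induction l generalizing a d sp with
  | nil => simp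
  | cons c t ih =>
    simp only [List.foldl_cons, List.countP_cons, List.length_cons]
    by_cases hα : PySem.Chars.isalpha c = true
    · have hd := pv_alpha_not_digit c hα
      rw [ih]
      simp only [hα, hd, if_true, if_false, Bool.false_eq_true, Prod.mk.injEq]
      refine ⟨by push_cast; ring, by push_cast; ring, by push_cast; ring⟩
    · by_cases hd : PySem.Chars.isdigit c = true <;>
        · rw [ih]
          simp only [hα, hd, if_true, if_false, Bool.false_eq_true, Prod.mk.injEq]
          refine ⟨by push_cast; ring, by push_cast; ring, by push_cast; ring⟩

-- ===== VERDICT (by name: the statement is the Claim_ definition above) =====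
theorem count_alphabets_digits_special_chars_spec : Claim_equal_count_alphabets_digits_special_chars := by
  intro s _
  show _ = _
  unfold count_alphabets_digits_special_chars count_alphabets_digits_special_chars_alt
  rw [pv_fold_eq]
  simp [PySem.Str.len]
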